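-- pv_equiv track=rewrite | github.com/WithoutHaste/RecreationalMath | pythonGenerators/generate_bell.py | permutation_is_invalid
-- ===== SOURCE A (Python) =====
-- def permutation_is_invalid(permutation):
-- 	""" returns True if the first-instances of each value are not in ascending order """
-- 	""" also, cannot skip any set-indexes, so need numbers 1..x """
-- 	first_instances = []
-- 	for val in permutation:
-- 		if val not in first_instances:
-- 			if len(first_instances) == 0 and val != 1:
-- 				return True
-- 			if len(first_instances) > 0 and val != first_instances[-1] + 1:
-- 				return True
-- 			first_instances.append(val)
-- 	return False
-- ===== SOURCE B (Python) =====
-- def permutation_is_invalid(permutation):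
-- 	""" invalid iff the first occurrences, in order, are not exactly 1..k """
-- 	firsts = list(dict.fromkeys(permutation))
-- 	return firsts != list(range(1, len(firsts) + 1))
-- ===== Notes on version B (the rewrite author's own statement) =====
-- stated objective: simpler
-- what changed: A makes one pass with early return, scanning its first-instances list per element to enforce 'next value = last+1'; B instead dedupes the whole list in one dict pass (first occurrences in order) and compares that sequence for equality with range(1, k+1) - a staged whole-sequence test with no per-element membership scan and no early return.
import Mathlib
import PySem

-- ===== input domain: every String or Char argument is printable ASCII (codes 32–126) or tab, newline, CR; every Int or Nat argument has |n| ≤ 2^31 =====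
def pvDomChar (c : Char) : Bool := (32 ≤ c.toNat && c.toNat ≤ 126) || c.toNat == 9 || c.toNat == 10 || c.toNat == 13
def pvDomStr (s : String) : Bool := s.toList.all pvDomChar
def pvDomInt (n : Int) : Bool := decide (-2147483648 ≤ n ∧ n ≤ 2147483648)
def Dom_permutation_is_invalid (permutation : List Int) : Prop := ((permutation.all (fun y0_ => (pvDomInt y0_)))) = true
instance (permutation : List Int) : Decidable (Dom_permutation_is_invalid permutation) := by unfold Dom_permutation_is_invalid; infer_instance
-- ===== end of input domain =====

-- B replaces A's single early-return pass (with a per-element membership scan of the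
-- first-instances list) by a staged whole-list computation: dedupe via dict.fromkeys,
-- then compare the first-occurrence sequence with range(1, k+1); objective: simpler.

-- ===== PORT A =====
-- A's loop over `permutation` with accumulator `first_instances`.
def pvFirstLoop (fi : List Int) : List Int → Bool
  | [] => false
  | v :: rest =>
    if v ∈ fi then pvFirstLoop fi rest
    else if fi.length = 0 ∧ v ≠ 1 then true
    else if fi.length > 0 ∧ v ≠ (PySem.List.pyGet? fi (-1)).getD 0 + 1 then true
    else pvFirstLoop (fi ++ [v]) rest

def permutation_is_invalid (permutation : List Int) : Bool :=
  pvFirstLoop [] permutation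

-- ===== PORT B =====
-- firsts = list(dict.fromkeys(permutation)); return firsts != list(range(1, len(firsts)+1))
def permutation_is_invalid_alt (permutation : List Int) : Bool :=
  let firsts := PySem.List.dedup permutation
  decide (firsts ≠ PySem.List.pyRange 1 ((firsts.length : Int) + 1) 1)

-- ===== PRECONDITION & SPEC =====
def Spec_permutation_is_invalid (permutation : List Int) (out : Bool) : Prop := out = permutation_is_invalid_alt permutation
instance (permutation : List Int) (out : Bool) : Decidable (Spec_permutation_is_invalid permutation out) := by unfold Spec_permutation_is_invalid; infer_instance

-- ===== CLAIM (what is proved, stated in full; the proofs are below) =====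
def Claim_equal_permutation_is_invalid : Prop := ∀ (permutation : List Int), Dom_permutation_is_invalid permutation → Spec_permutation_is_invalid permutation (permutation_is_invalid permutation)

-- ===== LEMMAS AND PROOFS =====

-- Proof helper: the running-max view of A's loop (each element is either max+1 or in 1..max).
def pvMaxLoop (m : Int) : List Int → Bool
  | [] => false
  | v :: rest =>
    if v = m + 1 then pvMaxLoop (m + 1) rest
    else if ¬ (1 ≤ v ∧ v ≤ m) then true
    else pvMaxLoop m rest

-- In a valid prefix, A's first_instances list is exactly [1, 2, …, m].
def fiOf : Nat → List Int
  | 0 => []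
  | m + 1 => fiOf m ++ [(m : Int) + 1]

theorem mem_fiOf (m : Nat) (v : Int) : v ∈ fiOf m ↔ 1 ≤ v ∧ v ≤ (m : Int) := by
  induction m with
  | zero => simp only [fiOf, List.not_mem_nil, false_iff]; omega
  | succ k ih => simp only [fiOf, List.mem_append, List.mem_singleton, ih]; omega

theorem fiOf_succ (m : Nat) : fiOf (m + 1) = fiOf m ++ [(m : Int) + 1] := rfl

theorem length_fiOf (m : Nat) : (fiOf m).length = m := by
  induction m with
  | zero => rfl
  | succ k ih => simp [fiOf, ih]

theorem fiOf_eq_range (m : Nat) : fiOf m = PySem.List.pyRange 1 ((m : Int) + 1) 1 := by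
  induction m with
  | zero => simp [fiOf, PySem.List.pyRange_one_eq_nil]
  | succ k ih =>
    rw [fiOf_succ, ih, ← PySem.List.pyRange_one_succ_right (by omega)]
    push_cast; ring_nf

theorem pvLoop_eq (xs : List Int) : ∀ m : Nat, pvFirstLoop (fiOf m) xs = pvMaxLoop (m : Int) xs := by
  induction xs with
  | nil => intro m; rfl
  | cons v rest ih =>
    intro m
    by_cases hmem : 1 ≤ v ∧ v ≤ (m : Int)
    · rw [pvFirstLoop, if_pos ((mem_fiOf m v).2 hmem), pvMaxLoop,
        if_neg (by omega), if_neg (by simp [hmem]), ih m]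
    · rw [pvFirstLoop, if_neg (fun h => hmem ((mem_fiOf m v).1 h))]
      cases m with
      | zero =>
        by_cases hv : v = 1
        · subst hv
          rw [if_neg (by simp [fiOf]), if_neg (by simp [fiOf])]
          have : fiOf 0 ++ [(1 : Int)] = fiOf 1 := by simp [fiOf]
          rw [this, ih 1, pvMaxLoop, if_pos (by norm_num)]
          norm_num
        · rw [if_pos ⟨by simp [fiOf], hv⟩, pvMaxLoop,
            if_neg (by omega), if_pos (by omega)]
      | succ k =>
        have hlast : (PySem.List.pyGet? (fiOf (k + 1)) (-1)).getD 0 = (k : Int) + 1 := by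
          rw [fiOf_succ, PySem.List.pyGet?_neg_one_append_singleton]; rfl
        by_cases hv : v = ((k : Nat) : Int) + 1 + 1
        · have hv' : v = (((k + 1 : Nat)) : Int) + 1 := by push_cast; omega
          have hfi : fiOf (k + 1) ++ [v] = fiOf (k + 2) := by
            rw [fiOf_succ (k + 1), hv']
          rw [if_neg (by simp [length_fiOf]), if_neg (by rw [hlast]; exact fun h => h.2 hv),
            hfi, ih (k + 2)]
          conv_rhs => rw [pvMaxLoop, if_pos hv']
          congr 1
        · rw [if_neg (by simp [length_fiOf]),
            if_pos ⟨by simp [length_fiOf], by rw [hlast]; exact hv⟩,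
            pvMaxLoop, if_neg (by push_cast at hv ⊢; omega), if_pos (by push_cast at hmem ⊢; omega)]

-- Set.add only ever appends: the accumulator is a prefix of the fold's result.
theorem foldl_add_suffix (xs : List Int) : ∀ s : List Int, ∃ t, List.foldl PySem.Set.add s xs = s ++ t := by
  induction xs with
  | nil => intro s; exact ⟨[], by simp⟩
  | cons v rest ih =>
    intro s
    rw [List.foldl_cons]
    by_cases h : PySem.Set.contains s v
    · obtain ⟨t, ht⟩ := ih s
      exact ⟨t, by rw [PySem.Set.add, if_pos h, ht]⟩
    · obtain ⟨t, ht⟩ := ih (s ++ [v])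
      exact ⟨v :: t, by rw [PySem.Set.add, if_neg h, ht, List.append_assoc]; rfl⟩

theorem contains_iff_mem (s : List Int) (v : Int) : PySem.Set.contains s v ↔ v ∈ s := by
  simp [PySem.Set.contains]

-- The running-max loop returns false exactly when the dedupe fold lands on some fiOf k.
theorem maxLoop_false_iff (xs : List Int) : ∀ m : Nat,
    pvMaxLoop (m : Int) xs = false ↔ ∃ k, List.foldl PySem.Set.add (fiOf m) xs = fiOf k := by
  induction xs with
  | nil =>
    intro m
    simp only [pvMaxLoop, List.foldl_nil, true_iff]
    exact ⟨m, rfl⟩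
  | cons v rest ih =>
    intro m
    rw [List.foldl_cons]
    by_cases hnew : v = (m : Int) + 1
    · have hnm : ¬ PySem.Set.contains (fiOf m) v := by
        rw [contains_iff_mem, mem_fiOf]; omega
      have hadd : PySem.Set.add (fiOf m) v = fiOf (m + 1) := by
        rw [PySem.Set.add, if_neg (by simpa using hnm), fiOf_succ, hnew]
      rw [pvMaxLoop, if_pos hnew, hadd]
      have : ((m : Int) + 1) = ((m + 1 : Nat) : Int) := by push_cast; ring
      rw [this]
      exact ih (m + 1)
    · by_cases hmem : 1 ≤ v ∧ v ≤ (m : Int)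
      · have hc : PySem.Set.contains (fiOf m) v := by
          rw [contains_iff_mem, mem_fiOf]; exact hmem
        have hadd : PySem.Set.add (fiOf m) v = fiOf m := by
          rw [PySem.Set.add, if_pos hc]
        rw [pvMaxLoop, if_neg hnew, if_neg (by simp [hmem]), hadd]
        exact ih m
      · have hnm : ¬ PySem.Set.contains (fiOf m) v := by
          rw [contains_iff_mem, mem_fiOf]; exact hmem
        have hadd : PySem.Set.add (fiOf m) v = fiOf m ++ [v] := by
          rw [PySem.Set.add, if_neg (by simpa using hnm)]
        rw [pvMaxLoop, if_neg hnew, if_pos hmem, hadd]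
        constructor
        · intro h; exact absurd h (by simp)
        · rintro ⟨k, hk⟩
          exfalso
          obtain ⟨t, ht⟩ := foldl_add_suffix rest (fiOf m ++ [v])
          rw [ht] at hk
          have hlen : m + 1 + t.length = k := by
            have := congrArg List.length hk
            simp [length_fiOf] at this
            omega
          have hmk : m < k := by omega
          have hL : (fiOf m ++ [v] ++ t)[m]? = some v := by
            rw [List.append_assoc, List.getElem?_append_right (by simp [length_fiOf])]
            simp [length_fiOf]
          have hR : (fiOf k)[m]? = some (1 + (m : Int)) := by
            rw [fiOf_eq_range, List.getElem?_eq_getElem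
              (by simp [PySem.List.length_pyRange_one]; omega)]
            rw [PySem.List.getElem_pyRange_one]
          rw [hk, hR] at hL
          have : v = 1 + (m : Int) := by injection hL.symm
          omega

-- ===== VERDICT (by name: the statement is the Claim_ definition above) =====
theorem permutation_is_invalid_spec : Claim_equal_permutation_is_invalid := by
  intro p _
  show permutation_is_invalid p = permutation_is_invalid_alt p
  have hA : permutation_is_invalid p = pvMaxLoop 0 p := by
    have := pvLoop_eq p 0
    simpa [permutation_is_invalid, fiOf] using this
  have hded : PySem.List.dedup p = List.foldl PySem.Set.add (fiOf 0) p := by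
    simp [PySem.List.dedup_eq_ofList, PySem.Set.ofList_eq_foldl, fiOf]
  have hiff : pvMaxLoop (0 : Int) p = false ↔ ∃ k, PySem.List.dedup p = fiOf k := by
    rw [hded]
    have := maxLoop_false_iff p 0
    simpa using this
  have hchar : (∃ k, PySem.List.dedup p = fiOf k) ↔
      PySem.List.dedup p = PySem.List.pyRange 1 (((PySem.List.dedup p).length : Int) + 1) 1 := by
    constructor
    · rintro ⟨k, hk⟩
      rw [hk, length_fiOf, ← fiOf_eq_range]
    · intro h
      exact ⟨(PySem.List.dedup p).length, by rw [fiOf_eq_range, ← h]⟩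
  rw [hA]
  unfold permutation_is_invalid_alt
  by_cases hEq : PySem.List.dedup p = PySem.List.pyRange 1 (((PySem.List.dedup p).length : Int) + 1) 1
  · rw [hiff.2 (hchar.2 hEq)]
    have hEq' : PySem.Set.ofList p = PySem.List.pyRange 1 ((((PySem.Set.ofList p).length : Int)) + 1) 1 := by
      rw [← PySem.List.dedup_eq_ofList]; exact hEq
    exact (decide_eq_false (not_not_intro hEq')).symm
  · have hne : pvMaxLoop (0 : Int) p ≠ false := fun h => hEq (hchar.1 (hiff.1 h))
    have htrue : pvMaxLoop (0 : Int) p = true := by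
      cases h : pvMaxLoop (0 : Int) p
      · exact absurd h hne
      · rfl
    rw [htrue]
    have hEq' : PySem.Set.ofList p ≠ PySem.List.pyRange 1 ((((PySem.Set.ofList p).length : Int)) + 1) 1 := by
      rw [← PySem.List.dedup_eq_ofList]; exact hEq
    exact (decide_eq_true hEq').symm
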